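-- pv_equiv track=rewrite | github.com/abarran02/CptS-355 | Labs/Lab3.py | getMonthlyCases
-- ===== SOURCE A (Python) =====
-- def getMonthlyCases(data: dict) -> dict:
--     monthlyCases = {}
--     for (county, cases) in data.items():
--         for (month, count) in cases.items():
--             if month not in monthlyCases:
--                 monthlyCases[month] = {county:count}
--             else:
--                 monthlyCases[month][county] = count
--
--     return monthlyCases
-- ===== SOURCE B (Python) =====
-- def getMonthlyCases(data: dict) -> dict:
--     months = dict.fromkeys(m for cases in data.values() for m in cases)
--     return {m: {county: cases[m] for county, cases in data.items() if m in cases}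
--             for m in months}
-- ===== Notes on version B (the rewrite author's own statement) =====
-- stated objective: alternative
-- what changed: A makes one county->month pass mutating a nested dict of dicts; B first collects the ordered distinct months (dict.fromkeys) and then builds the result with a month-outer dict comprehension that scans the counties per month.
import Mathlib
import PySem

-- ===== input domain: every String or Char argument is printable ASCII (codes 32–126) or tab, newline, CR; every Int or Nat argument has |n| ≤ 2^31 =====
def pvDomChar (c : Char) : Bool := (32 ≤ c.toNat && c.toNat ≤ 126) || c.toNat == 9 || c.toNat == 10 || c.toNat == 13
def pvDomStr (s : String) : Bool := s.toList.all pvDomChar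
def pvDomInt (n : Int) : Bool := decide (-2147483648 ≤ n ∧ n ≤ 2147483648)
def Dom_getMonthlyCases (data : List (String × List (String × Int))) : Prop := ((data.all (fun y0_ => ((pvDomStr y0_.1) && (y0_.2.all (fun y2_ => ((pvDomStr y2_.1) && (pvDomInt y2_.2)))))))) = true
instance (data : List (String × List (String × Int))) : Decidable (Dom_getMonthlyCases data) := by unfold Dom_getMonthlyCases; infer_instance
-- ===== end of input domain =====

-- B replaces A's single-pass nested-dict build by a two-phase form: ordered month dedup, then a per-month scan of the counties (alternative decomposition, same result).


-- ===== PORT A =====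
def getMonthlyCases (data : List (String × List (String × Int))) : List (String × List (String × Int)) :=
  let monthlyCases : PySem.Dict String (PySem.Dict String Int) :=
    data.foldl (fun mc cc =>
      cc.2.foldl (fun mc p =>
        match mc.get? p.1 with
        | none => mc.insert p.1 (PySem.Dict.empty.insert cc.1 p.2)
        | some inner => mc.insert p.1 (inner.insert cc.1 p.2)) mc)
      PySem.Dict.empty
  monthlyCases.items.map (fun p => (p.1, p.2.items))

-- ===== PORT B =====
def getMonthlyCases_alt (data : List (String × List (String × Int))) : List (String × List (String × Int)) :=
  let months : List String := PySem.List.dedup (data.flatMap (fun cc => cc.2.map (fun p => p.1)))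
  months.map (fun m =>
    (m, data.filterMap (fun cc => (cc.2.find? (fun p => p.1 == m)).map (fun p => (cc.1, p.2)))))

-- ===== PRECONDITION & SPEC =====
-- Pre_ excludes association lists with duplicate county keys or duplicate month keys inside a
-- county: such lists do not encode a Python dict (A's argument), duplicates collapse before A runs.
def Pre_getMonthlyCases (data : List (String × List (String × Int))) : Prop :=
  (data.map Prod.fst).Nodup ∧ ∀ cc ∈ data, (cc.2.map Prod.fst).Nodup
instance (data : List (String × List (String × Int))) : Decidable (Pre_getMonthlyCases data) := by
  unfold Pre_getMonthlyCases; infer_instance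
def pvWitness_getMonthlyCases : (List (String × List (String × Int))) :=
  [("adams", [("jan", 3), ("feb", 5)]), ("benton", [("feb", 1)])]

def Spec_getMonthlyCases (data : List (String × List (String × Int))) (out : List (String × List (String × Int))) : Prop := out = getMonthlyCases_alt data
instance (data : List (String × List (String × Int))) (out : List (String × List (String × Int))) : Decidable (Spec_getMonthlyCases data out) := by unfold Spec_getMonthlyCases; infer_instance

-- ===== CLAIM (what is proved, stated in full; the proofs are below) =====
def Claim_equal_getMonthlyCases : Prop := ∀ (data : List (String × List (String × Int))), Dom_getMonthlyCases data → Pre_getMonthlyCases data → Spec_getMonthlyCases data (getMonthlyCases data)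

-- ===== LEMMAS AND PROOFS =====


def collOne (cc : String × List (String × Int)) (m : String) : List (String × Int) :=
  ((cc.2.find? (fun p => p.1 == m)).map (fun p => (cc.1, p.2))).toList

def innerStep (name : String) (mc : PySem.Dict String (PySem.Dict String Int))
    (p : String × Int) : PySem.Dict String (PySem.Dict String Int) :=
  match mc.get? p.1 with
  | none => mc.insert p.1 (PySem.Dict.empty.insert name p.2)
  | some inner => mc.insert p.1 (inner.insert name p.2)

lemma collOne_cons_self (name m : String) (v : Int) (rest : List (String × Int)) :
    collOne (name, (m, v) :: rest) m = [(name, v)] := by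
  simp [collOne, List.find?]

lemma collOne_cons_ne (name m m' : String) (v : Int) (rest : List (String × Int))
    (h : m' ≠ m) : collOne (name, (m, v) :: rest) m' = collOne (name, rest) m' := by
  simp [collOne, List.find?, show (m == m') = false by simpa using fun e => h e.symm]

lemma collOne_of_not_mem (name m' : String) (cases : List (String × Int))
    (h : m' ∉ cases.map Prod.fst) : collOne (name, cases) m' = [] := by
  have : cases.find? (fun p => p.1 == m') = none := by
    rw [List.find?_eq_none]
    intro p hp hb
    exact h (List.mem_map.2 ⟨p, hp, by simpa using hb⟩)
  simp [collOne, this]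

lemma inner_items (name : String) (cases : List (String × Int))
    (mc : PySem.Dict String (PySem.Dict String Int))
    (hmk : mc.keys.Nodup)
    (hcase : (cases.map Prod.fst).Nodup)
    (hfresh : ∀ q ∈ mc.items, q.1 ∈ cases.map Prod.fst → ∀ r ∈ q.2.items, r.1 ≠ name) :
    (cases.foldl (innerStep name) mc).items.map (fun p => (p.1, p.2.items)) =
      mc.items.map (fun p => (p.1, p.2.items ++ collOne (name, cases) p.1))
      ++ ((cases.map Prod.fst).filter (fun m => !(mc.contains m))).map
           (fun m => (m, collOne (name, cases) m)) := by
  induction cases generalizing mc with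
  | nil => simp [collOne]
  | cons hd rest ih =>
    obtain ⟨m, v⟩ := hd
    have hcase' : (m :: rest.map Prod.fst).Nodup := by simpa using hcase
    have hmrest : m ∉ rest.map Prod.fst := (List.nodup_cons.1 hcase').1
    have hrestnd : (rest.map Prod.fst).Nodup := (List.nodup_cons.1 hcase').2
    rw [List.foldl_cons]
    rcases hget : mc.get? m with _ | inner
    · -- m is a new month: appended at the end with {name: v}
      have hnc : mc.contains m = false := by
        rw [PySem.Dict.contains_eq_isSome_get?, hget]; rfl
      have hnk : m ∉ mc.keys := by
        exact (PySem.Dict.get?_eq_none_iff_not_mem_keys mc m).1 hget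
      have hstep : innerStep name mc (m, v) = mc.insert m (PySem.Dict.empty.insert name v) := by
        simp [innerStep, hget]
      set single := (PySem.Dict.empty.insert name v : PySem.Dict String Int) with hsingle
      have hitems' : (mc.insert m single).items = mc.items ++ [(m, single)] :=
        PySem.Dict.items_insert_of_not_contains _ _ hnc
      have hkeys' : (mc.insert m single).keys = mc.keys ++ [m] :=
        PySem.Dict.keys_insert_of_not_contains _ _ hnc
      have hmk' : (mc.insert m single).keys.Nodup := by
        rw [hkeys']; simpa [List.nodup_append] using ⟨hmk, fun a ha e => hnk (e ▸ ha)⟩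
      have hfresh' : ∀ q ∈ (mc.insert m single).items, q.1 ∈ rest.map Prod.fst →
          ∀ r ∈ q.2.items, r.1 ≠ name := by
        intro q hq hq1 r hr
        rw [hitems'] at hq
        rcases List.mem_append.1 hq with hq | hq
        · exact hfresh q hq (by simp [hq1]) r hr
        · simp only [List.mem_singleton] at hq
          subst hq
          exact absurd hq1 (by simpa using hmrest)
      rw [hstep, ih _ hmk' hrestnd hfresh', hitems']
      have hsingleitems : single.items = [(name, v)] := rfl
      have hcollm : collOne (name, rest) m = [] := collOne_of_not_mem _ _ _ hmrest
      -- rewrite RHS filter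
      have hfilter : (((m, v) :: rest).map Prod.fst).filter (fun m' => !(mc.contains m')) =
          m :: (rest.map Prod.fst).filter (fun m' => !(mc.contains m')) := by
        simp [hnc]
      rw [hfilter]
      have hfpred : ∀ m' ∈ rest.map Prod.fst,
          (!( (mc.insert m single).contains m')) = (!(mc.contains m')) := by
        intro m' hm'
        have : m' ≠ m := fun e => hmrest (e ▸ hm')
        rw [PySem.Dict.contains_insert]
        simp [this]
      rw [List.filter_congr hfpred]
      simp only [List.map_append, List.map_cons, List.map_nil, List.append_assoc]
      congr 1
      · apply List.map_congr_left
        intro p hp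
        have hpne : p.1 ≠ m := fun e => hnk (e ▸ (List.mem_map.2 ⟨p, hp, rfl⟩))
        rw [collOne_cons_ne _ _ _ _ _ hpne]
      · rw [hsingleitems, hcollm, collOne_cons_self]
        simp only [List.cons_append, List.nil_append, List.append_nil]
        congr 1
        apply List.map_congr_left
        intro m' hm'
        have : m' ≠ m := fun e => hmrest (e ▸ (List.mem_of_mem_filter hm'))
        rw [collOne_cons_ne _ _ _ _ _ this]
    · -- m already present: the inner dict gets (name, v) appended
      have hstep : innerStep name mc (m, v) = mc.insert m (inner.insert name v) := by
        simp [innerStep, hget]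
      have hcm : mc.contains m = true := by
        rw [PySem.Dict.contains_eq_isSome_get?, hget]; rfl
      have hmemi : (m, inner) ∈ mc.items := PySem.Dict.mem_items_of_get?_eq_some mc hget
      have hinnerfresh : ∀ r ∈ inner.items, r.1 ≠ name :=
        hfresh (m, inner) hmemi (by simp)
      have hinc : inner.contains name = false := by
        rcases h : inner.contains name with _ | _
        · rfl
        · exfalso
          have := (PySem.Dict.contains_iff_mem_keys _ _).1 h
          rcases List.mem_map.1 this with ⟨r, hr, hre⟩
          exact hinnerfresh r hr hre
      have hinneritems : (inner.insert name v).items = inner.items ++ [(name, v)] :=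
        PySem.Dict.items_insert_of_not_contains _ _ hinc
      have hitems' : (mc.insert m (inner.insert name v)).items =
          mc.items.map (fun p => if p.1 == m then (m, inner.insert name v) else p) :=
        PySem.Dict.items_insert_of_contains _ _ hcm
      have hkeys' : (mc.insert m (inner.insert name v)).keys = mc.keys :=
        PySem.Dict.keys_insert_of_contains _ _ hcm
      have hmk' : (mc.insert m (inner.insert name v)).keys.Nodup := by rw [hkeys']; exact hmk
      have hfresh' : ∀ q ∈ (mc.insert m (inner.insert name v)).items, q.1 ∈ rest.map Prod.fst →
          ∀ r ∈ q.2.items, r.1 ≠ name := by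
        intro q hq hq1 r hr
        rw [hitems'] at hq
        rcases List.mem_map.1 hq with ⟨p, hp, hpe⟩
        by_cases hpm : p.1 = m
        · simp [hpm] at hpe
          rw [← hpe] at hq1
          exact absurd hq1 hmrest
        · simp [hpm] at hpe
          subst hpe
          exact hfresh p hp (by simp [hq1]) r hr
      rw [hstep, ih _ hmk' hrestnd hfresh', hitems']
      have hfilter : (((m, v) :: rest).map Prod.fst).filter (fun m' => !(mc.contains m')) =
          (rest.map Prod.fst).filter (fun m' => !(mc.contains m')) := by
        simp [hcm]
      rw [hfilter]
      have hfpred : ∀ m' ∈ rest.map Prod.fst,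
          (!( (mc.insert m (inner.insert name v)).contains m')) = (!(mc.contains m')) := by
        intro m' hm'
        have : m' ≠ m := fun e => hmrest (e ▸ hm')
        rw [PySem.Dict.contains_insert]
        simp [this]
      rw [List.filter_congr hfpred]
      congr 1
      · rw [List.map_map]
        apply List.map_congr_left
        intro p hp
        by_cases hpm : p.1 = m
        · have h2 := PySem.Dict.get?_of_mem_items mc (k := p.1) (v := p.2) (by simpa using hp) hmk
          rw [hpm, hget] at h2
          have hpinner : p.2 = inner := (Option.some_inj.1 h2).symm
          simp only [Function.comp, hpm, beq_self_eq_true, if_pos]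
          rw [hinneritems, collOne_cons_self, hpinner, collOne_of_not_mem _ _ _ hmrest]
          simp
        · simp only [Function.comp, show (p.1 == m) = false by simpa using hpm]
          rw [collOne_cons_ne _ _ _ _ _ hpm]
          simp
      · apply List.map_congr_left
        intro m' hm'
        have : m' ≠ m := fun e => hmrest (e ▸ (List.mem_of_mem_filter hm'))
        rw [collOne_cons_ne _ _ _ _ _ this]

def coll (data : List (String × List (String × Int))) (m : String) : List (String × Int) :=
  data.flatMap (fun cc => collOne cc m)

lemma fst_of_mem_collOne (cc : String × List (String × Int)) (m : String)
    (r : String × Int) (hr : r ∈ collOne cc m) : r.1 = cc.1 := by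
  unfold collOne at hr
  rcases h : cc.2.find? (fun p => p.1 == m) with _ | p <;> simp [h] at hr
  rw [hr]

lemma innerStep_eq (name : String) (mc : PySem.Dict String (PySem.Dict String Int))
    (p : String × Int) :
    innerStep name mc p = mc.insert p.1
      ((match mc.get? p.1 with
        | none => PySem.Dict.empty
        | some inner => inner).insert name p.2) := by
  rcases h : mc.get? p.1 with _ | inner <;> simp [innerStep, h]

lemma fold_items (data : List (String × List (String × Int)))
    (mc : PySem.Dict String (PySem.Dict String Int))
    (hmk : mc.keys.Nodup)
    (hcounty : (data.map Prod.fst).Nodup)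
    (hinner : ∀ cc ∈ data, (cc.2.map Prod.fst).Nodup)
    (hfresh : ∀ cc ∈ data, ∀ q ∈ mc.items, ∀ r ∈ q.2.items, r.1 ≠ cc.1) :
    (data.foldl (fun mc cc => cc.2.foldl (innerStep cc.1) mc) mc).items.map
        (fun p => (p.1, p.2.items)) =
      mc.items.map (fun p => (p.1, p.2.items ++ coll data p.1))
      ++ ((PySem.List.dedup (data.flatMap (fun cc => cc.2.map Prod.fst))).filter
            (fun m => !(mc.contains m))).map (fun m => (m, coll data m)) := by
  induction data generalizing mc with
  | nil => simp [coll]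
  | cons cc rest ih =>
    have hccM : (cc.2.map Prod.fst).Nodup := hinner cc (by simp)
    have hcc1 : cc.1 ∉ rest.map Prod.fst := by
      have : (cc.1 :: rest.map Prod.fst).Nodup := by simpa using hcounty
      exact (List.nodup_cons.1 this).1
    have hrestnd : (rest.map Prod.fst).Nodup := by
      have : (cc.1 :: rest.map Prod.fst).Nodup := by simpa using hcounty
      exact (List.nodup_cons.1 this).2
    rw [List.foldl_cons]
    set mc' := cc.2.foldl (innerStep cc.1) mc with hmc'
    have hfreshcc : ∀ q ∈ mc.items, q.1 ∈ cc.2.map Prod.fst → ∀ r ∈ q.2.items, r.1 ≠ cc.1 :=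
      fun q hq _ r hr => hfresh cc (by simp) q hq r hr
    have hII := inner_items cc.1 cc.2 mc hmk hccM hfreshcc
    -- keys of mc'
    have hfoldshape : mc' = cc.2.foldl (fun d x => d.insert x.1
        ((match d.get? x.1 with | none => PySem.Dict.empty | some inner => inner).insert cc.1 x.2)) mc := by
      rw [hmc']
      congr 1
      funext d x
      exact innerStep_eq cc.1 d x
    have hkeys' : mc'.keys = PySem.Set.update mc.keys (cc.2.map Prod.fst) := by
      rw [hfoldshape]
      exact PySem.Dict.keys_foldl_insert_key cc.2 Prod.fst _ mc
    have hmk' : mc'.keys.Nodup := by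
      rw [hfoldshape]
      exact PySem.Dict.nodup_keys_foldl_insert_key cc.2 Prod.fst _ mc hmk
    -- freshness of remaining counties w.r.t. mc'
    have hfresh' : ∀ cc' ∈ rest, ∀ q ∈ mc'.items, ∀ r ∈ q.2.items, r.1 ≠ cc'.1 := by
      intro cc' hcc' q hq r hr
      have hne : cc'.1 ≠ cc.1 := by
        intro e
        exact hcc1 (e ▸ List.mem_map.2 ⟨cc', hcc', rfl⟩)
      have hqm : (q.1, q.2.items) ∈ mc'.items.map
          (fun p => (p.1, p.2.items)) := List.mem_map.2 ⟨q, hq, rfl⟩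
      rw [hII] at hqm
      rcases List.mem_append.1 hqm with h | h
      · rcases List.mem_map.1 h with ⟨p, hp, he⟩
        have h2 : q.2.items = p.2.items ++ collOne (cc.1, cc.2) p.1 := by
          have := congrArg Prod.snd he
          exact this.symm
        rw [h2] at hr
        rcases List.mem_append.1 hr with h3 | h3
        · exact hfresh cc' (by simp [hcc']) p hp r h3
        · rw [fst_of_mem_collOne _ _ _ h3]
          exact fun e => hne e.symm
      · rcases List.mem_map.1 h with ⟨m, hm, he⟩
        have h2 : q.2.items = collOne (cc.1, cc.2) m := (congrArg Prod.snd he).symm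
        rw [h2] at hr
        rw [fst_of_mem_collOne _ _ _ hr]
        exact fun e => hne e.symm
    rw [ih mc' hmk' hrestnd (fun c hc => hinner c (by simp [hc])) hfresh']
    -- rewrite mc'.items.map through hII
    have hmap1 : mc'.items.map (fun p => (p.1, p.2.items ++ coll rest p.1)) =
        (mc'.items.map (fun p => (p.1, p.2.items))).map (fun q => (q.1, q.2 ++ coll rest q.1)) := by
      rw [List.map_map]
      rfl
    rw [hmap1, hII]
    simp only [List.map_append, List.map_map]
    have hcollcons : ∀ m, coll (cc :: rest) m = collOne cc m ++ coll rest m :=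
      fun m => by simp [coll]
    have hdedup : PySem.List.dedup ((cc :: rest).flatMap (fun c => c.2.map Prod.fst)) =
        cc.2.map Prod.fst ++ (PySem.List.dedup (rest.flatMap (fun c => c.2.map Prod.fst))).filter
          (fun y => !(PySem.Set.contains (cc.2.map Prod.fst) y)) := by
      rw [List.flatMap_cons]
      simp only [PySem.List.dedup_eq_ofList]
      rw [PySem.Set.ofList_append, PySem.Set.update_eq_append_filter]
      simp only [PySem.Set.ofList_eq_self_of_nodup _ hccM]
    have hfiltC3 : (PySem.List.dedup (rest.flatMap (fun c => c.2.map Prod.fst))).filter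
          (fun m => !mc'.contains m)
        = ((PySem.List.dedup (rest.flatMap (fun c => c.2.map Prod.fst))).filter
            (fun y => !(PySem.Set.contains (cc.2.map Prod.fst) y))).filter
            (fun m => !mc.contains m) := by
      rw [List.filter_filter]
      apply List.filter_congr
      intro m hm
      rw [PySem.Dict.contains_eq_decide_mem_keys, hkeys']
      by_cases h1 : m ∈ mc.keys <;> by_cases h2 : m ∈ cc.2.map Prod.fst <;>
        simp [PySem.Set.mem_update, PySem.Dict.contains_eq_decide_mem_keys, h1, h2]
    rw [hdedup, List.filter_append, List.map_append, hfiltC3, List.append_assoc]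
    have g1 : List.map ((fun q => (q.1, q.2 ++ coll rest q.1)) ∘
          fun p => (p.1, p.2.items ++ collOne (cc.1, cc.2) p.1)) mc.items =
        List.map (fun p => (p.1, p.2.items ++ coll (cc :: rest) p.1)) mc.items := by
      apply List.map_congr_left
      intro p hp
      simp [hcollcons]
    have g2 : List.map ((fun q => (q.1, q.2 ++ coll rest q.1)) ∘
          fun m => (m, collOne (cc.1, cc.2) m))
          (List.filter (fun m => !mc.contains m) (cc.2.map Prod.fst)) =
        List.map (fun m => (m, coll (cc :: rest) m))
          (List.filter (fun m => !mc.contains m) (cc.2.map Prod.fst)) := by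
      apply List.map_congr_left
      intro m hm
      simp [hcollcons]
    have g3 : List.map (fun m => (m, coll rest m))
          (((PySem.List.dedup (rest.flatMap (fun c => c.2.map Prod.fst))).filter
            (fun y => !(PySem.Set.contains (cc.2.map Prod.fst) y))).filter
            (fun m => !mc.contains m)) =
        List.map (fun m => (m, coll (cc :: rest) m))
          (((PySem.List.dedup (rest.flatMap (fun c => c.2.map Prod.fst))).filter
            (fun y => !(PySem.Set.contains (cc.2.map Prod.fst) y))).filter
            (fun m => !mc.contains m)) := by
      apply List.map_congr_left
      intro m hm
      have hm2 := List.mem_filter.1 (List.mem_of_mem_filter hm)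
      have hnotin : m ∉ cc.2.map Prod.fst := by
        have h3 := hm2.2
        simp at h3
        intro hmem
        rcases List.mem_map.1 hmem with ⟨p, hp, he⟩
        exact h3 p.2 (by rw [← he]; simpa using hp)
      rw [hcollcons, collOne_of_not_mem _ _ _ hnotin]
      simp
    rw [g1, g2, g3]

lemma ports_agree (data : List (String × List (String × Int)))
    (h1 : (data.map Prod.fst).Nodup) (h2 : ∀ cc ∈ data, (cc.2.map Prod.fst).Nodup) :
    getMonthlyCases data = getMonthlyCases_alt data := by
  unfold getMonthlyCases getMonthlyCases_alt
  have hED : (PySem.Dict.empty : PySem.Dict String (PySem.Dict String Int)).items = [] := rfl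
  have h := fold_items data PySem.Dict.empty (by simp [PySem.Dict.keys_empty])
    h1 h2 (by intro cc hcc q hq; rw [hED] at hq; simp at hq)
  rw [show (fun (mc : PySem.Dict String (PySem.Dict String Int))
        (cc : String × List (String × Int)) =>
      cc.2.foldl (fun mc p =>
        match mc.get? p.1 with
        | none => mc.insert p.1 (PySem.Dict.empty.insert cc.1 p.2)
        | some inner => mc.insert p.1 (inner.insert cc.1 p.2)) mc) =
      (fun mc cc => cc.2.foldl (innerStep cc.1) mc) from rfl]
  rw [h, hED]
  simp only [List.map_nil, List.nil_append, PySem.Dict.contains_empty, Bool.not_false,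
    List.filter_true]
  apply List.map_congr_left
  intro m hm
  congr 1
  rw [coll, List.filterMap_eq_flatMap_toList]
  rfl

-- ===== VERDICT (by name: the statement is the Claim_ definition above) =====
theorem getMonthlyCases_spec : Claim_equal_getMonthlyCases := by
  intro data _ hpre
  unfold Spec_getMonthlyCases
  exact ports_agree data hpre.1 hpre.2
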